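-- pv_equiv track=rewrite | github.com/ervin-macic/leetcode-for-fun | 2573. Find the String with LCP/2573. Find the String with LCP.py | _verify_lcp
-- ===== SOURCE A (Python) =====
-- from typing import List
--
-- def _verify_lcp(word: List[str], lcp: List[List[int]], n: int) -> bool:
--     for i in range(n - 1, -1, -1):
--         for j in range(n - 1, -1, -1):
--             if word[i] != word[j]:
--                 if lcp[i][j] != 0:
--                     return False
--             else:
--                 if i == n - 1 or j == n - 1:
--                     if lcp[i][j] != 1:
--                         return False
--                 else:
--                     if lcp[i][j] != lcp[i + 1][j + 1] + 1:
--                         return False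
--     return True
-- ===== SOURCE B (Python) =====
-- from typing import List
--
-- def _verify_lcp(word: List[str], lcp: List[List[int]], n: int) -> bool:
--     # Recompute each LCP cell from scratch by counting matching tokens,
--     # instead of checking A's DP recurrence against neighbouring cells.
--     for i in range(n):
--         for j in range(n):
--             k = 0
--             while i + k < n and j + k < n and word[i + k] == word[j + k]:
--                 k += 1
--             if lcp[i][j] != k:
--                 return False
--     return True
-- ===== Notes on version B (the rewrite author's own statement) =====
-- stated objective: alternative
-- what changed: B recomputes every LCP cell directly by counting consecutive matching tokens (a while loop per cell) and compares it to lcp[i][j], instead of A's backward sweep checking the DP recurrence lcp[i][j] = lcp[i+1][j+1]+1 against neighbouring cells; Pre_ requires the well-formed n-by-n shape (word and lcp of size >= n), excluding inputs where A raises IndexError and also malformed tables on which A merely happens to return False before reaching the short row, where the two traversal orders would hit the missing entry at different times.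
-- outside the precondition, e.g. on _verify_lcp(['b', 'a', 'b'], [[], [2, 2, 0], [1, 1, 2, 1]], 3): A returns False, B raises IndexError
import Mathlib
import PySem

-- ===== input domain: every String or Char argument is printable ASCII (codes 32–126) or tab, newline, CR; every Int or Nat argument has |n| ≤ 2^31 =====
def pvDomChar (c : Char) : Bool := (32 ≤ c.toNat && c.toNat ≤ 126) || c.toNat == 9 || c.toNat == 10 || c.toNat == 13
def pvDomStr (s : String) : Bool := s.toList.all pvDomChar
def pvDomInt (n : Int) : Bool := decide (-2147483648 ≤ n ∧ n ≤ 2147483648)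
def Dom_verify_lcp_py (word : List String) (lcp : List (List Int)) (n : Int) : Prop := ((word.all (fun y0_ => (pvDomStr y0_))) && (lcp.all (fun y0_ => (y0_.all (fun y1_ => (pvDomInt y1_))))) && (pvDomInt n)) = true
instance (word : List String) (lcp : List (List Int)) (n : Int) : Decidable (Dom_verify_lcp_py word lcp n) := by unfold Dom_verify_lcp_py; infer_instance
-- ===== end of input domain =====

-- B recomputes each LCP cell directly by counting matching tokens instead of checking A's DP recurrence; alternative decomposition, not faster.


-- shared accessors: word[i] and lcp[i][j]; the .getD defaults are unreachable inside Pre_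
def pvWget (word : List String) (i : Int) : String := (PySem.List.pyGet? word i).getD ""
def pvLget (lcp : List (List Int)) (i j : Int) : Int :=
  (PySem.List.pyGet? ((PySem.List.pyGet? lcp i).getD []) j).getD 0

-- ===== PORT A =====
def pvInnerA (word : List String) (lcp : List (List Int)) (n i : Int) : List Int → Bool
  | [] => true
  | j :: js =>
    if pvWget word i ≠ pvWget word j then
      if pvLget lcp i j ≠ 0 then false else pvInnerA word lcp n i js
    else
      if i == n - 1 || j == n - 1 then
        if pvLget lcp i j ≠ 1 then false else pvInnerA word lcp n i js
      else
        if pvLget lcp i j ≠ pvLget lcp (i + 1) (j + 1) + 1 then false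
        else pvInnerA word lcp n i js

def pvOuterA (word : List String) (lcp : List (List Int)) (n : Int) : List Int → Bool
  | [] => true
  | i :: is =>
    if pvInnerA word lcp n i (PySem.List.pyRange (n - 1) (-1) (-1)) then
      pvOuterA word lcp n is
    else false

def verify_lcp_py (word : List String) (lcp : List (List Int)) (n : Int) : Bool :=
  pvOuterA word lcp n (PySem.List.pyRange (n - 1) (-1) (-1))

-- ===== PORT B =====
-- the while loop 'while i+k<n and j+k<n and word[i+k]==word[j+k]: k+=1'; returns the final k
def pvMatchLen (word : List String) (n i j k : Int) : Int :=
  if h : i + k < n ∧ j + k < n ∧ pvWget word (i + k) = pvWget word (j + k) then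
    pvMatchLen word n i j (k + 1)
  else k
termination_by (n - (i + k)).toNat
decreasing_by omega

def pvInnerB (word : List String) (lcp : List (List Int)) (n i : Int) : List Int → Bool
  | [] => true
  | j :: js =>
    if pvLget lcp i j ≠ pvMatchLen word n i j 0 then false
    else pvInnerB word lcp n i js

def pvOuterB (word : List String) (lcp : List (List Int)) (n : Int) : List Int → Bool
  | [] => true
  | i :: is =>
    if pvInnerB word lcp n i (PySem.List.pyRange 0 n 1) then pvOuterB word lcp n is
    else false

def verify_lcp_py_alt (word : List String) (lcp : List (List Int)) (n : Int) : Bool :=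
  pvOuterB word lcp n (PySem.List.pyRange 0 n 1)

-- ===== PRECONDITION & SPEC =====
-- Pre_ requires the well-formed n-by-n shape (word, lcp and its first n rows of size ≥ n): outside it
-- A raises IndexError, except on some malformed tables where A happens to return False before reaching
-- the short row while B's different traversal order hits the missing entry first and raises there.
-- the first m rows of the list each have length ≥ n
def pvRowsOk (n : Int) : List (List Int) → Int → Bool
  | [], _ => true
  | r :: rs, m => if m ≤ 0 then true else decide (n ≤ (r.length : Int)) && pvRowsOk n rs (m - 1)

def Pre_verify_lcp_py (word : List String) (lcp : List (List Int)) (n : Int) : Prop :=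
  n ≤ (word.length : Int) ∧ n ≤ (lcp.length : Int) ∧ pvRowsOk n lcp n = true
instance (word : List String) (lcp : List (List Int)) (n : Int) : Decidable (Pre_verify_lcp_py word lcp n) := by unfold Pre_verify_lcp_py; infer_instance

def pvWitness_verify_lcp_py : List String × List (List Int) × Int :=
  (["a", "b", "a"], [[3, 0, 1], [0, 2, 0], [1, 0, 1]], 3)

def Spec_verify_lcp_py (word : List String) (lcp : List (List Int)) (n : Int) (out : Bool) : Prop := out = verify_lcp_py_alt word lcp n
instance (word : List String) (lcp : List (List Int)) (n : Int) (out : Bool) : Decidable (Spec_verify_lcp_py word lcp n out) := by unfold Spec_verify_lcp_py; infer_instance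

-- ===== CLAIM (what is proved, stated in full; the proofs are below) =====
def Claim_equal_verify_lcp_py : Prop := ∀ (word : List String) (lcp : List (List Int)) (n : Int), Dom_verify_lcp_py word lcp n → Pre_verify_lcp_py word lcp n → Spec_verify_lcp_py word lcp n (verify_lcp_py word lcp n)

-- ===== LEMMAS AND PROOFS =====

-- one cell of A's recurrence check, as a Bool
def pvCellA (word : List String) (lcp : List (List Int)) (n i j : Int) : Bool :=
  if pvWget word i ≠ pvWget word j then pvLget lcp i j == 0
  else if i == n - 1 || j == n - 1 then pvLget lcp i j == 1
  else pvLget lcp i j == pvLget lcp (i + 1) (j + 1) + 1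

theorem innerA_eq_all (word : List String) (lcp : List (List Int)) (n i : Int)
    (L : List Int) : pvInnerA word lcp n i L = L.all (pvCellA word lcp n i) := by
  induction L with
  | nil => rfl
  | cons j js ih =>
    simp only [pvInnerA, pvCellA, List.all_cons]
    split_ifs <;> simp_all

theorem outerA_eq_all (word : List String) (lcp : List (List Int)) (n : Int)
    (L : List Int) :
    pvOuterA word lcp n L
      = L.all (fun i => pvInnerA word lcp n i (PySem.List.pyRange (n - 1) (-1) (-1))) := by
  induction L with
  | nil => rfl
  | cons i is ih =>
    simp only [pvOuterA, List.all_cons]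
    split_ifs <;> simp_all

theorem innerB_eq_all (word : List String) (lcp : List (List Int)) (n i : Int)
    (L : List Int) :
    pvInnerB word lcp n i L
      = L.all (fun j => pvLget lcp i j == pvMatchLen word n i j 0) := by
  induction L with
  | nil => rfl
  | cons j js ih =>
    simp only [pvInnerB, List.all_cons]
    split_ifs <;> simp_all

theorem outerB_eq_all (word : List String) (lcp : List (List Int)) (n : Int)
    (L : List Int) :
    pvOuterB word lcp n L
      = L.all (fun i => pvInnerB word lcp n i (PySem.List.pyRange 0 n 1)) := by
  induction L with
  | nil => rfl
  | cons i is ih =>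
    simp only [pvOuterB, List.all_cons]
    split_ifs <;> simp_all

-- while-loop shift: starting one step in equals starting at (i+1, j+1) plus one
theorem matchLen_shift (word : List String) (n i j k : Int) :
    pvMatchLen word n i j (k + 1) = pvMatchLen word n (i + 1) (j + 1) k + 1 := by
  conv_lhs => rw [pvMatchLen]
  conv_rhs => rw [pvMatchLen]
  have e1 : i + (k + 1) = i + 1 + k := by ring
  have e2 : j + (k + 1) = j + 1 + k := by ring
  rw [e1, e2]
  by_cases h : i + 1 + k < n ∧ j + 1 + k < n ∧ pvWget word (i + 1 + k) = pvWget word (j + 1 + k)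
  · rw [dif_pos h, dif_pos h]
    exact matchLen_shift word n i j (k + 1)
  · rw [dif_neg h, dif_neg h]
termination_by (n - (i + k)).toNat
decreasing_by omega

theorem matchLen_stop (word : List String) (n i j : Int)
    (h : ¬(i < n ∧ j < n ∧ pvWget word i = pvWget word j)) :
    pvMatchLen word n i j 0 = 0 := by
  rw [pvMatchLen]
  simp only [add_zero]
  exact dif_neg h

theorem matchLen_step (word : List String) (n i j : Int)
    (h : i < n ∧ j < n ∧ pvWget word i = pvWget word j) :
    pvMatchLen word n i j 0 = pvMatchLen word n (i + 1) (j + 1) 0 + 1 := by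
  rw [pvMatchLen]
  simp only [add_zero]
  rw [dif_pos h, show (0 : Int) + 1 = 0 + 1 from rfl, matchLen_shift]

-- forward direction: if every cell satisfies A's recurrence, lcp equals the recomputed table
theorem cells_to_matchLen (word : List String) (lcp : List (List Int)) (n : Int)
    (H : ∀ i j : Int, 0 ≤ i → i < n → 0 ≤ j → j < n → pvCellA word lcp n i j = true) :
    ∀ t : Nat, ∀ i j : Int, (n - i).toNat ≤ t → 0 ≤ i → i < n → 0 ≤ j → j < n →
      pvLget lcp i j = pvMatchLen word n i j 0 := by
  intro t
  induction t with
  | zero => intro i j ht h0i hin h0j hjn; omega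
  | succ t ih =>
    intro i j ht h0i hin h0j hjn
    have hc := H i j h0i hin h0j hjn
    unfold pvCellA at hc
    by_cases hw : pvWget word i = pvWget word j
    · simp only [hw, ne_eq, not_true_eq_false, if_false] at hc
      by_cases hb : i = n - 1 ∨ j = n - 1
      · have hb' : (i == n - 1 || j == n - 1) = true := by
          rcases hb with hb | hb <;> simp [hb]
        rw [if_pos hb'] at hc
        rw [matchLen_step word n i j ⟨hin, hjn, hw⟩,
            matchLen_stop word n (i + 1) (j + 1) (by omega)]
        simpa using hc
      · have hb' : ¬((i == n - 1 || j == n - 1) = true) := by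
          simp only [Bool.or_eq_true, beq_iff_eq]; tauto
        rw [if_neg hb'] at hc
        have hi1 : i + 1 < n := by omega
        have hj1 : j + 1 < n := by omega
        rw [matchLen_step word n i j ⟨hin, hjn, hw⟩,
            ← ih (i + 1) (j + 1) (by omega) (by omega) hi1 (by omega) hj1]
        simpa using hc
    · simp only [ne_eq, hw, not_false_eq_true, if_true, beq_iff_eq] at hc
      rw [matchLen_stop word n i j (by tauto), hc]

-- backward direction: if lcp equals the recomputed table, every cell satisfies A's recurrence
theorem matchLen_to_cells (word : List String) (lcp : List (List Int)) (n : Int)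
    (H : ∀ i j : Int, 0 ≤ i → i < n → 0 ≤ j → j < n →
      pvLget lcp i j = pvMatchLen word n i j 0) :
    ∀ i j : Int, 0 ≤ i → i < n → 0 ≤ j → j < n → pvCellA word lcp n i j = true := by
  intro i j h0i hin h0j hjn
  unfold pvCellA
  by_cases hw : pvWget word i = pvWget word j
  · simp only [hw, ne_eq, not_true_eq_false, if_false]
    by_cases hb : i = n - 1 ∨ j = n - 1
    · have hb' : (i == n - 1 || j == n - 1) = true := by
        rcases hb with hb | hb <;> simp [hb]
      rw [if_pos hb']
      rw [H i j h0i hin h0j hjn, matchLen_step word n i j ⟨hin, hjn, hw⟩,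
          matchLen_stop word n (i + 1) (j + 1) (by omega)]
      decide
    · have hb' : ¬((i == n - 1 || j == n - 1) = true) := by
        simp only [Bool.or_eq_true, beq_iff_eq]; tauto
      rw [if_neg hb']
      rw [H i j h0i hin h0j hjn, matchLen_step word n i j ⟨hin, hjn, hw⟩,
          ← H (i + 1) (j + 1) (by omega) (by omega) (by omega) (by omega)]
      simp
  · simp only [ne_eq, hw, not_false_eq_true, if_true, beq_iff_eq]
    rw [H i j h0i hin h0j hjn, matchLen_stop word n i j (by tauto)]

-- ===== VERDICT (by name: the statement is the Claim_ definition above) =====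
theorem verify_lcp_py_spec : Claim_equal_verify_lcp_py := by
  intro word lcp n _ _
  show verify_lcp_py word lcp n = verify_lcp_py_alt word lcp n
  unfold verify_lcp_py verify_lcp_py_alt
  rw [outerA_eq_all, outerB_eq_all]
  have hA : (∀ i ∈ PySem.List.pyRange (n - 1) (-1) (-1),
        pvInnerA word lcp n i (PySem.List.pyRange (n - 1) (-1) (-1)) = true)
      ↔ (∀ i j : Int, 0 ≤ i → i < n → 0 ≤ j → j < n → pvCellA word lcp n i j = true) := by
    constructor
    · intro h i j h0i hin h0j hjn
      have := h i (by rw [PySem.List.mem_pyRange_neg_one]; omega)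
      rw [innerA_eq_all, List.all_eq_true] at this
      exact this j (by rw [PySem.List.mem_pyRange_neg_one]; omega)
    · intro h i hi
      rw [innerA_eq_all, List.all_eq_true]
      intro j hj
      rw [PySem.List.mem_pyRange_neg_one] at hi hj
      exact h i j (by omega) (by omega) (by omega) (by omega)
  have hB : (∀ i ∈ PySem.List.pyRange 0 n 1,
        pvInnerB word lcp n i (PySem.List.pyRange 0 n 1) = true)
      ↔ (∀ i j : Int, 0 ≤ i → i < n → 0 ≤ j → j < n →
          pvLget lcp i j = pvMatchLen word n i j 0) := by
    constructor
    · intro h i j h0i hin h0j hjn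
      have := h i (by rw [PySem.List.mem_pyRange_one]; omega)
      rw [innerB_eq_all, List.all_eq_true] at this
      have := this j (by rw [PySem.List.mem_pyRange_one]; omega)
      simpa using this
    · intro h i hi
      rw [innerB_eq_all, List.all_eq_true]
      intro j hj
      rw [PySem.List.mem_pyRange_one] at hi hj
      simp [h i j (by omega) (by omega) (by omega) (by omega)]
  have key : (∀ i j : Int, 0 ≤ i → i < n → 0 ≤ j → j < n → pvCellA word lcp n i j = true)
      ↔ (∀ i j : Int, 0 ≤ i → i < n → 0 ≤ j → j < n →
          pvLget lcp i j = pvMatchLen word n i j 0) := by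
    constructor
    · intro H i j h0i hin h0j hjn
      exact cells_to_matchLen word lcp n H (n - i).toNat i j le_rfl h0i hin h0j hjn
    · exact matchLen_to_cells word lcp n
  by_cases hP : ∀ i j : Int, 0 ≤ i → i < n → 0 ≤ j → j < n → pvCellA word lcp n i j = true
  · have a1 := List.all_eq_true.mpr (hA.mpr hP)
    have a2 := List.all_eq_true.mpr (hB.mpr (key.mp hP))
    rw [a1, a2]
  · have a1 : ((PySem.List.pyRange (n - 1) (-1) (-1)).all
        fun i => pvInnerA word lcp n i (PySem.List.pyRange (n - 1) (-1) (-1))) = false :=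
      Bool.eq_false_iff.mpr fun h => hP (hA.mp (List.all_eq_true.mp h))
    have a2 : ((PySem.List.pyRange 0 n 1).all
        fun i => pvInnerB word lcp n i (PySem.List.pyRange 0 n 1)) = false :=
      Bool.eq_false_iff.mpr fun h => hP (key.mpr (hB.mp (List.all_eq_true.mp h)))
    rw [a1, a2]
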